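-- pv_equiv track=rewrite | github.com/BinaryIgor/tools-and-templates | cli/src/generate_machines_data.py | ip_addresses
-- ===== SOURCE A (Python) =====
-- def ip_addresses(networks_data):
--     public_ip = None
--     private_ip = None
--
--     for address in networks_data:
--         if address['type'] == 'public':
--             public_ip = address['ip_address']
--         if address['type'] == 'private':
--             private_ip = address['ip_address']
--
--     return public_ip, private_ip
-- ===== SOURCE B (Python) =====
-- def ip_addresses(networks_data):
--     def last_ip(kind):
--         for a in reversed(networks_data):
--             if a['type'] == kind:
--                 return a['ip_address']
--         return None
--     return last_ip('public'), last_ip('private')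
-- ===== Notes on version B (the rewrite author's own statement) =====
-- stated objective: alternative
-- what changed: Replaces the forward full pass with two mutable accumulators by two independent backward first-match searches that early-exit at the most recent entry of each type.
import Mathlib
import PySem

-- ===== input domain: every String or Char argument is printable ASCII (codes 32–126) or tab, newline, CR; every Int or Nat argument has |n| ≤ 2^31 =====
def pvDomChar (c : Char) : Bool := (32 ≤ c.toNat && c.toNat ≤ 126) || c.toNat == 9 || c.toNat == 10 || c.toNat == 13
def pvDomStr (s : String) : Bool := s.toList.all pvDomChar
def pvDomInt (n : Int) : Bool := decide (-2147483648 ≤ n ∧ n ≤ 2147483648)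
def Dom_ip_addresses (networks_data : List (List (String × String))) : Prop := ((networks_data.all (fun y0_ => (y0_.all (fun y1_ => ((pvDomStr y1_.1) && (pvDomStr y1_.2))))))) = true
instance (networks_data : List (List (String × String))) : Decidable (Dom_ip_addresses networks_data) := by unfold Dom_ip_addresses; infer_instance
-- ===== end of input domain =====

-- B replaces A's forward accumulator pass by two backward first-match searches with early exit; alternative, same cost.


-- ===== PORT A =====
-- A: one forward loop, two guarded reassignments of public_ip / private_ip.
def ipA_step (st : Option String × Option String) (address : List (String × String)) :
    Option String × Option String :=
  let st1 := if (PySem.Dict.mk address).getD "type" "" == "public"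
             then ((PySem.Dict.mk address).get? "ip_address", st.2) else st
  if (PySem.Dict.mk address).getD "type" "" == "private"
  then (st1.1, (PySem.Dict.mk address).get? "ip_address") else st1

def ip_addresses (networks_data : List (List (String × String))) : Option String × Option String :=
  networks_data.foldl ipA_step (none, none)

-- ===== PORT B =====
-- B: last_ip(kind) = first match when scanning the REVERSED list, early exit; run twice.
def ipB_find (kind : String) : List (List (String × String)) → Option String
  | [] => none
  | a :: rest =>
      if (PySem.Dict.mk a).getD "type" "" == kind
      then (PySem.Dict.mk a).get? "ip_address"
      else ipB_find kind rest

def ip_addresses_alt (networks_data : List (List (String × String))) : Option String × Option String :=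
  (ipB_find "public" networks_data.reverse, ipB_find "private" networks_data.reverse)

-- ===== PRECONDITION & SPEC =====
-- Pre_ excludes exactly the inputs on which the Python A raises KeyError: an entry without a
-- 'type' key, or a public/private entry without an 'ip_address' key.
def Pre_ip_addresses (networks_data : List (List (String × String))) : Prop :=
  ∀ a ∈ networks_data, (PySem.Dict.mk a).contains "type" = true ∧
    (((PySem.Dict.mk a).getD "type" "" = "public" ∨ (PySem.Dict.mk a).getD "type" "" = "private") →
      (PySem.Dict.mk a).contains "ip_address" = true)
instance (networks_data : List (List (String × String))) : Decidable (Pre_ip_addresses networks_data) := by unfold Pre_ip_addresses; infer_instance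

def pvWitness_ip_addresses : (List (List (String × String))) :=
  [[("type", "public"), ("ip_address", "1.2.3.4")], [("type", "internal")]]

def Spec_ip_addresses (networks_data : List (List (String × String))) (out : Option String × Option String) : Prop := out = ip_addresses_alt networks_data
instance (networks_data : List (List (String × String))) (out : Option String × Option String) : Decidable (Spec_ip_addresses networks_data out) := by unfold Spec_ip_addresses; infer_instance

-- ===== CLAIM (what is proved, stated in full; the proofs are below) =====
def Claim_equal_ip_addresses : Prop := ∀ (networks_data : List (List (String × String))), Dom_ip_addresses networks_data → Pre_ip_addresses networks_data → Spec_ip_addresses networks_data (ip_addresses networks_data)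

-- ===== LEMMAS AND PROOFS =====

-- Appending one entry at the end of the searched list only matters if nothing matched before.
theorem ipB_find_append (kind : String) (l : List (List (String × String))) (a : List (String × String))
    (hl : ∀ b ∈ l, ((PySem.Dict.mk b).getD "type" "" == kind) = true →
      ∃ v, (PySem.Dict.mk b).get? "ip_address" = some v) :
    ipB_find kind (l ++ [a]) =
      (ipB_find kind l).or
        (if (PySem.Dict.mk a).getD "type" "" == kind
         then (PySem.Dict.mk a).get? "ip_address" else none) := by
  induction l with
  | nil => simp [ipB_find]
  | cons b rest ih =>
    by_cases hb : ((PySem.Dict.mk b).getD "type" "" == kind) = true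
    · obtain ⟨v, hv⟩ := hl b (by simp) hb
      simp [ipB_find, hb, hv]
    · have ih' := ih (fun x hx => hl x (by simp [hx]))
      simp only [List.cons_append, ipB_find, hb, if_false, Bool.false_eq_true]
      rw [ih']

-- Loop invariant: A's accumulators equal B's reverse searches, falling back to the start state.
theorem ip_fold_eq_find (nd : List (List (String × String)))
    (hpre : ∀ a ∈ nd, (PySem.Dict.mk a).contains "type" = true ∧
      (((PySem.Dict.mk a).getD "type" "" = "public" ∨ (PySem.Dict.mk a).getD "type" "" = "private") →
        (PySem.Dict.mk a).contains "ip_address" = true))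
    (st : Option String × Option String) :
    nd.foldl ipA_step st =
      ((ipB_find "public" nd.reverse).or st.1, (ipB_find "private" nd.reverse).or st.2) := by
  induction nd generalizing st with
  | nil => simp [ipB_find]
  | cons a rest ih =>
    obtain ⟨ht, hip⟩ := hpre a (by simp)
    have hpre' : ∀ x ∈ rest, (PySem.Dict.mk x).contains "type" = true ∧
        (((PySem.Dict.mk x).getD "type" "" = "public" ∨ (PySem.Dict.mk x).getD "type" "" = "private") →
          (PySem.Dict.mk x).contains "ip_address" = true) :=
      fun x hx => hpre x (by simp [hx])
    have hsome : ∀ k, (PySem.Dict.mk a).getD "type" "" = k → (k = "public" ∨ k = "private") →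
        ∃ v, (PySem.Dict.mk a).get? "ip_address" = some v := by
      intro k hk hkk
      have hc := hip (by cases hkk with
        | inl h => exact Or.inl (hk.trans h)
        | inr h => exact Or.inr (hk.trans h))
      rw [PySem.Dict.contains_eq_isSome_get?] at hc
      exact Option.isSome_iff_exists.mp hc
    have hl : ∀ (k : String), ∀ b ∈ rest.reverse, ((PySem.Dict.mk b).getD "type" "" == k) = true →
        (k = "public" ∨ k = "private") → ∃ v, (PySem.Dict.mk b).get? "ip_address" = some v := by
      intro k b hb hk hkk
      obtain ⟨_, hip'⟩ := hpre' b (List.mem_reverse.mp hb)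
      have hkeq : (PySem.Dict.mk b).getD "type" "" = k := by
        simpa using hk
      have hc := hip' (by cases hkk with
        | inl h => exact Or.inl (hkeq.trans h)
        | inr h => exact Or.inr (hkeq.trans h))
      rw [PySem.Dict.contains_eq_isSome_get?] at hc
      exact Option.isSome_iff_exists.mp hc
    simp only [List.foldl_cons, List.reverse_cons,
      ipB_find_append "public" _ _ (fun b hb hk => hl "public" b hb hk (Or.inl rfl)),
      ipB_find_append "private" _ _ (fun b hb hk => hl "private" b hb hk (Or.inr rfl)),
      ih hpre', Prod.mk.injEq]
    constructor
    · by_cases hpub : (PySem.Dict.mk a).getD "type" "" = "public"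
      · obtain ⟨v, hv⟩ := hsome _ hpub (Or.inl rfl)
        simp [ipA_step, hpub, hv]
      · by_cases hpriv : (PySem.Dict.mk a).getD "type" "" = "private"
        · simp [ipA_step, hpriv]
        · simp [ipA_step, hpub, hpriv]
    · by_cases hpriv : (PySem.Dict.mk a).getD "type" "" = "private"
      · obtain ⟨v, hv⟩ := hsome _ hpriv (Or.inr rfl)
        simp [ipA_step, hpriv, hv]
      · by_cases hpub : (PySem.Dict.mk a).getD "type" "" = "public"
        · simp [ipA_step, hpub]
        · simp [ipA_step, hpub, hpriv]

-- ===== VERDICT (by name: the statement is the Claim_ definition above) =====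
theorem ip_addresses_spec : Claim_equal_ip_addresses := by
  intro nd _ hpre
  unfold Spec_ip_addresses ip_addresses ip_addresses_alt
  simp [ip_fold_eq_find nd hpre (none, none)]
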